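-- pv_equiv track=rewrite | github.com/Vineyardcode/voynich_slop | scripts/phase79_gallows_collapse.py | collapse_two_class
-- ===== SOURCE A (Python) =====
-- GALLOWS_TRI = ['cth', 'ckh', 'cph', 'cfh']
--
-- GALLOWS_BI  = ['ch', 'sh', 'th', 'kh', 'ph', 'fh']
--
-- def eva_to_glyphs(word):
--     glyphs = []
--     i = 0
--     w = word.lower()
--     while i < len(w):
--         if i + 2 < len(w) and w[i:i+3] in GALLOWS_TRI:
--             glyphs.append(w[i:i+3]); i += 3
--         elif i + 1 < len(w) and w[i:i+2] in GALLOWS_BI: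
--             glyphs.append(w[i:i+2]); i += 2
--         else:
--             glyphs.append(w[i]); i += 1
--     return glyphs
--
-- def glyphs_to_word(glyphs):
--     return ''.join(glyphs)
--
-- def collapse_two_class(word):
--     """Replace {p,f}→P and {t,k}→T (keep 2-class distinction)."""
--     glyphs = eva_to_glyphs(word)
--     new = []
--     for g in glyphs:
--         if g in ('p', 'f'):
--             new.append('P')
--         elif g in ('t', 'k'):
--             new.append('T')
--         elif g in ('cph', 'cfh'):
--             new.append('CP')
--         elif g in ('cth', 'ckh'):
--             new.append('CT')
--         else:
--             new.append(g)
--     return glyphs_to_word(new)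
-- ===== SOURCE B (Python) =====
-- MAP1 = {'t': 'T', 'k': 'T', 'p': 'P', 'f': 'P'}
--
-- def _start(ch):
--     """Begin a fresh token on ch: (emitted text, new pending state)."""
--     if ch in 'cstkpf':
--         return '', ch
--     return ch, ''
--
-- def _flush(state):
--     """Emit a pending prefix that can no longer be extended."""
--     if len(state) == 2:
--         return 'c' + MAP1[state[1]]
--     return MAP1.get(state, state)
--
-- def collapse_two_class(word):
--     """Replace {p,f}->P and {t,k}->T (keep 2-class distinction)."""
--     out = []
--     state = ''  # pending prefix: '', 'c','s','t','k','p','f','ct','ck','cp','cf'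
--     for ch in word.lower():
--         if state == '':
--             o, state = _start(ch)
--         elif state == 'c' and ch in 'tkpf':
--             o, state = '', 'c' + ch
--         elif ch == 'h' and len(state) == 2:
--             o, state = 'C' + MAP1[state[1]], ''
--         elif ch == 'h' and state != '':
--             o, state = state + 'h', ''
--         else:
--             o2, state2 = _start(ch)
--             o, state = _flush(state) + o2, state2
--         out.append(o)
--     out.append(_flush(state))
--     return ''.join(out)
-- ===== Notes on version B (the rewrite author's own statement) =====
-- stated objective: faster
-- what changed: Replaces A's two-phase design (slicing tokenizer with 3/2-char lookahead building a glyph list, then a second substitution loop) by a one-character-at-a-time finite-state machine: a pending-prefix state ('', 'c','s','t','k','p','f','ct','ck','cp','cf') is advanced per character and emits collapsed output directly, with no slicing, no lookahead and no intermediate token list.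
import Mathlib
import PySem

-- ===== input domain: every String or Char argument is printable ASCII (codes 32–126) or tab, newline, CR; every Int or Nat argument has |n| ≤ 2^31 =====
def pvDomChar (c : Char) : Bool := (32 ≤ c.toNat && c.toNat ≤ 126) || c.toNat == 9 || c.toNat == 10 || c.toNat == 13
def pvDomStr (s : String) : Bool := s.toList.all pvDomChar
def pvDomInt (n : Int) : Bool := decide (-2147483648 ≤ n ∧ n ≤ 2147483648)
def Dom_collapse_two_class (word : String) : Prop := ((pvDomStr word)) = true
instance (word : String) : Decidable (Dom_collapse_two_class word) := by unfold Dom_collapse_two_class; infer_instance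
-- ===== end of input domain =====

set_option maxRecDepth 8192


-- B replaces A's tokenize-then-substitute design by a per-character finite-state machine (no slicing, no lookahead, no token list; measured faster in a timing run).

-- ===== PORT A =====
-- GALLOWS_TRI / GALLOWS_BI, as lists of char lists
def pvGT : List (List Char) := [['c','t','h'], ['c','k','h'], ['c','p','h'], ['c','f','h']]
def pvGB : List (List Char) := [['c','h'], ['s','h'], ['t','h'], ['k','h'], ['p','h'], ['f','h']]

-- eva_to_glyphs: the index-advancing while loop, as the structural recursion on the suffix
-- (index i kept as the remaining suffix; w[i:i+3] = take 3, the guards i+2<len / i+1<len = 3 ≤ length / 2 ≤ length)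
def pvEvaTok : List Char → List (List Char)
  | [] => []
  | c :: rest =>
    if 3 ≤ (c :: rest).length ∧ (c :: rest).take 3 ∈ pvGT then
      (c :: rest).take 3 :: pvEvaTok (rest.drop 2)
    else if 2 ≤ (c :: rest).length ∧ (c :: rest).take 2 ∈ pvGB then
      (c :: rest).take 2 :: pvEvaTok (rest.drop 1)
    else
      [c] :: pvEvaTok rest
  termination_by s => s.length
  decreasing_by
  all_goals simp

-- the if/elif substitution chain of collapse_two_class's for-loop
def pvMapGlyph (g : List Char) : List Char :=
  if g = ['p'] ∨ g = ['f'] then ['P']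
  else if g = ['t'] ∨ g = ['k'] then ['T']
  else if g = ['c','p','h'] ∨ g = ['c','f','h'] then ['C','P']
  else if g = ['c','t','h'] ∨ g = ['c','k','h'] then ['C','T']
  else g

def collapse_two_class (word : String) : String :=
  String.mk (((pvEvaTok (PySem.Str.lower word).toList).map pvMapGlyph).flatten)

-- ===== PORT B =====
-- MAP1 of Source B (an association list; pvMap1At = MAP1.get(x, x), = MAP1[x] on gallows letters)
def pvMAP1 : List (Char × Char) := [('t','T'), ('k','T'), ('p','P'), ('f','P')]
def pvMap1At (x : Char) : Char := (pvMAP1.lookup x).getD x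

-- _start of Source B
def pvStart (ch : Char) : List Char × List Char :=
  if ch ∈ (['c','s','t','k','p','f'] : List Char) then ([], [ch]) else ([ch], [])

-- _flush of Source B
def pvFlushB (st : List Char) : List Char :=
  if st.length = 2 then ['c', pvMap1At (st[1]?.getD ' ')]
  else match st with
    | [x] => [pvMap1At x]
    | _ => st

-- the body of Source B's for-loop (accumulator = (out, state))
def pvStepB : List Char × List Char → Char → List Char × List Char
  | (out, st), ch =>
    if st = [] then
      (out ++ (pvStart ch).1, (pvStart ch).2)
    else if st = ['c'] ∧ ch ∈ (['t','k','p','f'] : List Char) then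
      (out, ['c', ch])
    else if ch = 'h' ∧ st.length = 2 then
      (out ++ ['C', pvMap1At (st[1]?.getD ' ')], [])
    else if ch = 'h' ∧ st ≠ [] then
      (out ++ st ++ ['h'], [])
    else
      (out ++ pvFlushB st ++ (pvStart ch).1, (pvStart ch).2)

def collapse_two_class_alt (word : String) : String :=
  let r := (PySem.Str.lower word).toList.foldl pvStepB ([], [])
  String.mk (r.1 ++ pvFlushB r.2)

-- ===== PRECONDITION & SPEC =====
def Spec_collapse_two_class (word : String) (out : String) : Prop := out = collapse_two_class_alt word
instance (word : String) (out : String) : Decidable (Spec_collapse_two_class word out) := by unfold Spec_collapse_two_class; infer_instance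

-- ===== CLAIM (what is proved, stated in full; the proofs are below) =====
def Claim_equal_collapse_two_class : Prop := ∀ (word : String), Dom_collapse_two_class word → Spec_collapse_two_class word (collapse_two_class word)

-- ===== LEMMAS AND PROOFS =====

-- the reachable pending states of B's machine
def pvStates : List (List Char) :=
  [[], ['c'], ['s'], ['t'], ['k'], ['p'], ['f'], ['c','t'], ['c','k'], ['c','p'], ['c','f']]

-- flushing a reachable pending state agrees with A's tokenize-and-map of that state alone
lemma pvFlush_ok : ∀ st ∈ pvStates, pvFlushB st = ((pvEvaTok st).map pvMapGlyph).flatten := by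
  intro st hst
  fin_cases hst <;>
    simp [pvFlushB, pvEvaTok, pvMapGlyph, pvGT, pvGB, pvMap1At, pvMAP1, List.lookup]

-- A's tokenizer on a non-starter first character
lemma pvTok_nonstart (x : Char) (r : List Char)
    (hx : x ∉ (['c','s','t','k','p','f'] : List Char)) :
    pvEvaTok (x :: r) = [x] :: pvEvaTok r := by
  simp only [List.mem_cons, List.not_mem_nil, or_false, not_or] at hx
  obtain ⟨h1, h2, h3, h4, h5, h6⟩ := hx
  rw [pvEvaTok,
    if_neg (by rintro ⟨-, hm⟩; simp [pvGT, h1] at hm),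
    if_neg (by rintro ⟨-, hm⟩; simp [pvGB, h1, h2, h3, h4, h5, h6] at hm)]
  try simp

-- A's single glyph on a non-starter character maps to itself
lemma pvMap_nonstart (x : Char) (hx : x ∉ (['c','s','t','k','p','f'] : List Char)) :
    pvMapGlyph [x] = [x] := by
  simp only [List.mem_cons, List.not_mem_nil, or_false, not_or] at hx
  obtain ⟨h1, h2, h3, h4, h5, h6⟩ := hx
  simp [pvMapGlyph, h3, h4, h5, h6]

-- A's single starter glyph maps as MAP1.get
lemma pvMap_starter (y : Char) (hy : y ∈ (['s','t','k','p','f'] : List Char)) :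
    pvMapGlyph [y] = [pvMap1At y] := by
  fin_cases hy <;> decide

-- kept bigrams map to themselves
lemma pvMap_bigram (y : Char) (hy : y ∈ (['c','s','t','k','p','f'] : List Char)) :
    pvMapGlyph [y, 'h'] = [y, 'h'] := by
  fin_cases hy <;> decide

-- gallows trigrams collapse to 'C' + class letter
lemma pvMap_tri (y : Char) (hy : y ∈ (['t','k','p','f'] : List Char)) :
    pvMapGlyph ['c', y, 'h'] = ['C', pvMap1At y] := by
  fin_cases hy <;> decide

-- A's tokenizer: a starter followed by 'h' is the kept bigram
lemma pvTok_bigram (y : Char) (r : List Char)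
    (hy : y ∈ (['c','s','t','k','p','f'] : List Char)) :
    pvEvaTok (y :: 'h' :: r) = [y, 'h'] :: pvEvaTok r := by
  fin_cases hy <;>
    (rw [pvEvaTok,
      if_neg (by rintro ⟨-, hm⟩; simp [pvGT] at hm),
      if_pos ⟨by simp, by simp [pvGB]⟩]
     try simp)

-- A's tokenizer: a single starter ≠ 'c' followed by a non-'h' is a single glyph
lemma pvTok_single (y x : Char) (r : List Char)
    (hy : y ∈ (['s','t','k','p','f'] : List Char)) (hx : x ≠ 'h') :
    pvEvaTok (y :: x :: r) = [y] :: pvEvaTok (x :: r) := by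
  fin_cases hy <;>
    (rw [pvEvaTok,
      if_neg (by rintro ⟨-, hm⟩; simp [pvGT] at hm),
      if_neg (by rintro ⟨-, hm⟩; simp [pvGB, hx] at hm)]
     try simp)

-- A's tokenizer: 'c' followed by a char outside {h,t,k,p,f} is a single glyph
lemma pvTok_c_single (x : Char) (r : List Char)
    (hx : x ∉ (['h','t','k','p','f'] : List Char)) :
    pvEvaTok ('c' :: x :: r) = ['c'] :: pvEvaTok (x :: r) := by
  simp only [List.mem_cons, List.not_mem_nil, or_false, not_or] at hx
  obtain ⟨h1, h2, h3, h4, h5⟩ := hx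
  rw [pvEvaTok,
    if_neg (by rintro ⟨-, hm⟩; simp [pvGT, h2, h3, h4, h5] at hm),
    if_neg (by rintro ⟨-, hm⟩; simp [pvGB, h1] at hm)]
  try simp

-- A's tokenizer: the full gallows trigram
lemma pvTok_tri (y : Char) (r : List Char)
    (hy : y ∈ (['t','k','p','f'] : List Char)) :
    pvEvaTok ('c' :: y :: 'h' :: r) = ['c', y, 'h'] :: pvEvaTok r := by
  fin_cases hy <;>
    (rw [pvEvaTok, if_pos (⟨by simp, by simp [pvGT]⟩ :
        3 ≤ _ ∧ _)]
     try simp)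

-- A's tokenizer: 'c', a gallows letter, then a non-'h': the 'c' is a single glyph
lemma pvTok_ct_single (y x : Char) (r : List Char)
    (hy : y ∈ (['t','k','p','f'] : List Char)) (hx : x ≠ 'h') :
    pvEvaTok ('c' :: y :: x :: r) = ['c'] :: pvEvaTok (y :: x :: r) := by
  fin_cases hy <;>
    (rw [pvEvaTok,
      if_neg (by rintro ⟨-, hm⟩; simp [pvGT, hx] at hm),
      if_neg (by rintro ⟨-, hm⟩; simp [pvGB] at hm)]
     try simp)

-- starting a fresh character agrees with A (closes the restart branches)
lemma pvStart_ok (x : Char) (r out : List Char)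
    (ih : ∀ out' st', st' ∈ pvStates →
      (r.foldl pvStepB (out', st')).1 ++ pvFlushB (r.foldl pvStepB (out', st')).2 =
        out' ++ ((pvEvaTok (st' ++ r)).map pvMapGlyph).flatten) :
    (r.foldl pvStepB (out ++ (pvStart x).1, (pvStart x).2)).1 ++
        pvFlushB (r.foldl pvStepB (out ++ (pvStart x).1, (pvStart x).2)).2 =
      out ++ ((pvEvaTok (x :: r)).map pvMapGlyph).flatten := by
  by_cases hx : x ∈ (['c','s','t','k','p','f'] : List Char)
  · rw [show pvStart x = ([], [x]) from by simp [pvStart, hx]]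
    have := ih (out ++ []) [x] (by fin_cases hx <;> simp [pvStates])
    simpa using this
  · rw [show pvStart x = ([x], []) from by simp [pvStart, hx]]
    have := ih (out ++ [x]) [] (by simp [pvStates])
    simp only [List.nil_append] at this
    rw [this, pvTok_nonstart x r hx]
    simp [pvMap_nonstart x hx]

-- one step from a single pending starter ≠ 'c'
lemma pvStep_singleCase (y x : Char) (r out : List Char)
    (hy : y ∈ (['s','t','k','p','f'] : List Char))
    (ih : ∀ out' st', st' ∈ pvStates →
      (r.foldl pvStepB (out', st')).1 ++ pvFlushB (r.foldl pvStepB (out', st')).2 =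
        out' ++ ((pvEvaTok (st' ++ r)).map pvMapGlyph).flatten) :
    (r.foldl pvStepB (pvStepB (out, [y]) x)).1 ++
        pvFlushB (r.foldl pvStepB (pvStepB (out, [y]) x)).2 =
      out ++ ((pvEvaTok (y :: x :: r)).map pvMapGlyph).flatten := by
  have hyc : y ≠ 'c' := by fin_cases hy <;> decide
  by_cases hh : x = 'h'
  · subst hh
    rw [show pvStepB (out, [y]) 'h' = (out ++ [y] ++ ['h'], []) from by
      simp [pvStepB, hyc]]
    have := ih (out ++ [y] ++ ['h']) [] (by simp [pvStates])
    simp only [List.nil_append] at this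
    rw [this, pvTok_bigram y r (by fin_cases hy <;> simp),
      List.map_cons, List.flatten_cons, pvMap_bigram y (by fin_cases hy <;> simp)]
    simp
  · rw [show pvStepB (out, [y]) x = (out ++ pvFlushB [y] ++ (pvStart x).1, (pvStart x).2) from by
      simp [pvStepB, hyc, hh]]
    rw [show pvFlushB [y] = [pvMap1At y] from rfl]
    have := pvStart_ok x r (out ++ [pvMap1At y]) ih
    simp only [List.append_assoc] at this ⊢
    rw [this, pvTok_single y x r hy hh,
      List.map_cons, List.flatten_cons, pvMap_starter y hy]
    try simp

-- one step from a pending 'c' + gallows letter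
lemma pvStep_doubleCase (y x : Char) (r out : List Char)
    (hy : y ∈ (['t','k','p','f'] : List Char))
    (ih : ∀ out' st', st' ∈ pvStates →
      (r.foldl pvStepB (out', st')).1 ++ pvFlushB (r.foldl pvStepB (out', st')).2 =
        out' ++ ((pvEvaTok (st' ++ r)).map pvMapGlyph).flatten) :
    (r.foldl pvStepB (pvStepB (out, ['c', y]) x)).1 ++
        pvFlushB (r.foldl pvStepB (pvStepB (out, ['c', y]) x)).2 =
      out ++ ((pvEvaTok ('c' :: y :: x :: r)).map pvMapGlyph).flatten := by
  by_cases hh : x = 'h'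
  · subst hh
    rw [show pvStepB (out, ['c', y]) 'h' = (out ++ ['C', pvMap1At y], []) from by
      simp [pvStepB]]
    have := ih (out ++ ['C', pvMap1At y]) [] (by simp [pvStates])
    simp only [List.nil_append] at this
    rw [this, pvTok_tri y r hy, List.map_cons, List.flatten_cons, pvMap_tri y hy]
    simp
  · rw [show pvStepB (out, ['c', y]) x = (out ++ pvFlushB ['c', y] ++ (pvStart x).1, (pvStart x).2) from by
      simp [pvStepB, hh]]
    rw [show pvFlushB ['c', y] = ['c', pvMap1At y] from by simp [pvFlushB]]
    have := pvStart_ok x r (out ++ ['c', pvMap1At y]) ih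
    simp only [List.append_assoc] at this ⊢
    rw [this, pvTok_ct_single y x r hy hh,
      pvTok_single y x r (by fin_cases hy <;> simp) hh,
      List.map_cons, List.map_cons, List.flatten_cons, List.flatten_cons,
      pvMap_starter y (by fin_cases hy <;> simp),
      show pvMapGlyph ['c'] = ['c'] from by decide]
    simp

-- the machine invariant: running B's loop from a reachable pending state and flushing
-- equals A's tokenize-and-map of pending-plus-remaining-input
lemma pvInv : ∀ (s : List Char) (out st : List Char), st ∈ pvStates →
    (s.foldl pvStepB (out, st)).1 ++ pvFlushB (s.foldl pvStepB (out, st)).2 =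
      out ++ ((pvEvaTok (st ++ s)).map pvMapGlyph).flatten := by
  intro s
  induction s with
  | nil =>
    intro out st hst
    simpa using congrArg (out ++ ·) (pvFlush_ok st hst)
  | cons x r ih =>
    intro out st hst
    simp only [List.foldl_cons]
    simp only [pvStates, List.mem_cons, List.not_mem_nil, or_false] at hst
    rcases hst with rfl | rfl | rfl | rfl | rfl | rfl | rfl | rfl | rfl | rfl | rfl
    all_goals simp only [List.cons_append, List.nil_append]
    -- st = []
    · rw [show pvStepB (out, []) x = (out ++ (pvStart x).1, (pvStart x).2) from by
        simp [pvStepB]]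
      simpa using pvStart_ok x r out ih
    -- st = ['c']
    · by_cases hx : x ∈ (['t','k','p','f'] : List Char)
      · rw [show pvStepB (out, ['c']) x = (out, ['c', x]) from by
          simp [pvStepB, hx]]
        have := ih out ['c', x] (by fin_cases hx <;> simp [pvStates])
        simpa using this
      · by_cases hh : x = 'h'
        · subst hh
          rw [show pvStepB (out, ['c']) 'h' = (out ++ ['c'] ++ ['h'], []) from by
            simp [pvStepB]]
          have := ih (out ++ ['c'] ++ ['h']) [] (by simp [pvStates])
          simp only [List.nil_append] at this
          rw [this, pvTok_bigram 'c' r (by simp),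
            List.map_cons, List.flatten_cons, pvMap_bigram 'c' (by simp)]
          simp
        · rw [show pvStepB (out, ['c']) x = (out ++ pvFlushB ['c'] ++ (pvStart x).1, (pvStart x).2) from by
            simp [pvStepB, hx, hh]]
          rw [show pvFlushB ['c'] = ['c'] from rfl]
          have := pvStart_ok x r (out ++ ['c']) ih
          simp only [List.append_assoc] at this ⊢
          rw [this, pvTok_c_single x r (by
              simp only [List.mem_cons, List.not_mem_nil, or_false, not_or] at hx ⊢
              exact ⟨hh, hx⟩),
            List.map_cons, List.flatten_cons, show pvMapGlyph ['c'] = ['c'] from by decide]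
          try simp
    -- st = ['s'], ['t'], ['k'], ['p'], ['f']
    · exact pvStep_singleCase 's' x r out (by simp) ih
    · exact pvStep_singleCase 't' x r out (by simp) ih
    · exact pvStep_singleCase 'k' x r out (by simp) ih
    · exact pvStep_singleCase 'p' x r out (by simp) ih
    · exact pvStep_singleCase 'f' x r out (by simp) ih
    -- st = ['c','t'], ['c','k'], ['c','p'], ['c','f']
    · exact pvStep_doubleCase 't' x r out (by simp) ih
    · exact pvStep_doubleCase 'k' x r out (by simp) ih
    · exact pvStep_doubleCase 'p' x r out (by simp) ih
    · exact pvStep_doubleCase 'f' x r out (by simp) ih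

-- ===== VERDICT (by name: the statement is the Claim_ definition above) =====
theorem collapse_two_class_spec : Claim_equal_collapse_two_class := by
  intro word _
  unfold Spec_collapse_two_class collapse_two_class collapse_two_class_alt
  have := pvInv (PySem.Str.lower word).toList [] [] (by simp [pvStates])
  simp only [List.nil_append] at this
  rw [← this]
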